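-- pv_equiv track=rewrite | github.com/TalDru/KeywordExtractor | main.py | count_words_in_list
-- ===== SOURCE A (Python) =====
-- def count_words_in_list(word_list):
--     word_list.sort()
--     word_count_dict = {}
--
--     for raw_word in word_list:
--         word = raw_word.capitalize()
--         if word not in word_count_dict.keys():
--             if word[:-1] in word_count_dict.keys():
--                 word_count_dict[word[:-1]] += 1
--             else:
--                 word_count_dict[word] = 1
--         else:
--             if word[:-1] in word_count_dict.keys():
--                 word_count_dict[word[:-1]] += 1
--             else:
--                 word_count_dict[word] += 1
--
--     return word_count_dict
-- ===== SOURCE B (Python) =====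
-- def count_words_in_list(word_list):
--     word_list.sort()
--     # frequency table of the raw (sorted) words, insertion order = sorted order
--     freq = {}
--     for w in word_list:
--         freq[w] = freq.get(w, 0) + 1
--     d = {}
--     for raw, k in freq.items():
--         word = raw.capitalize()
--         stem = word[:-1]
--         if stem in d:
--             d[stem] += k
--         elif word in d:
--             d[word] += k
--         else:
--             d[word] = k
--     return d
-- ===== Notes on version B (the rewrite author's own statement) =====
-- stated objective: alternative
-- what changed: A increments the dict once per occurrence while scanning the sorted list; B first builds a frequency table of the sorted raw words and then does one merge pass over the distinct words, adding each aggregated count to the stem key if present, else to the word key.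
import Mathlib
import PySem

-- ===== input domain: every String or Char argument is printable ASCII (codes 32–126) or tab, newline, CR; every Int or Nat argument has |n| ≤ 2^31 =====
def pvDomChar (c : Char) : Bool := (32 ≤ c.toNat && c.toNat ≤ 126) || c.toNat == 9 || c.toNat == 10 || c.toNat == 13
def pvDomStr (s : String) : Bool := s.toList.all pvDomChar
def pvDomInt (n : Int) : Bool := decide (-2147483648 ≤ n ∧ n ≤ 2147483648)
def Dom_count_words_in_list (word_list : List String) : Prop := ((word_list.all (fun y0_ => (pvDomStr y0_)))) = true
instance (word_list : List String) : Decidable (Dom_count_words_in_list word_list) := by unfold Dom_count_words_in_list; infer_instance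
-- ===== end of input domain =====

-- B replaces A's per-occurrence increment loop by a frequency table over the sorted raw words
-- followed by one merge pass over the distinct words (objective: alternative decomposition).
-- Both A and B sort word_list in place (same mutation); the equivalence proved is about the return value.

-- ===== PORT A =====
-- str.capitalize() (exact on ASCII): first char uppercased, the rest lowercased; used by both ports.
def pvCap (s : String) : String :=
  match s.toList with
  | [] => ""
  | c :: cs => String.ofList (PySem.Chars.upperChar c :: PySem.Chars.lower cs)

-- word[:-1]
def pvStem (w : String) : String := PySem.Str.slice w none (some (-1))

-- the body of A's 'for raw_word in word_list' loop
def pvStepA (d : PySem.Dict String Int) (raw_word : String) : PySem.Dict String Int :=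
  let word := pvCap raw_word
  if !(d.contains word) then
    if d.contains (pvStem word) then d.insert (pvStem word) (d.getD (pvStem word) 0 + 1)
    else d.insert word 1
  else
    if d.contains (pvStem word) then d.insert (pvStem word) (d.getD (pvStem word) 0 + 1)
    else d.insert word (d.getD word 0 + 1)

def count_words_in_list (word_list : List String) : List (String × Int) :=
  ((PySem.List.sorted word_list (fun x => x) false).foldl pvStepA PySem.Dict.empty).items

-- ===== PORT B =====
-- the body of B's merge loop over freq.items()
def pvStepB (d : PySem.Dict String Int) (p : String × Int) : PySem.Dict String Int :=
  let word := pvCap p.1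
  let stem := pvStem word
  if d.contains stem then d.insert stem (d.getD stem 0 + p.2)
  else if d.contains word then d.insert word (d.getD word 0 + p.2)
  else d.insert word p.2

def count_words_in_list_alt (word_list : List String) : List (String × Int) :=
  let s := PySem.List.sorted word_list (fun x => x) false
  let freq := s.foldl (fun d w => d.insert w (d.getD w 0 + 1)) PySem.Dict.empty
  (freq.items.foldl pvStepB PySem.Dict.empty).items

-- ===== PRECONDITION & SPEC =====
def Spec_count_words_in_list (word_list : List String) (out : List (String × Int)) : Prop := out = count_words_in_list_alt word_list
instance (word_list : List String) (out : List (String × Int)) : Decidable (Spec_count_words_in_list word_list out) := by unfold Spec_count_words_in_list; infer_instance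

-- ===== CLAIM (what is proved, stated in full; the proofs are below) =====
def Claim_equal_count_words_in_list : Prop := ∀ (word_list : List String), Dom_count_words_in_list word_list → Spec_count_words_in_list word_list (count_words_in_list word_list)

-- ===== LEMMAS AND PROOFS =====

-- A run of n+1 copies of the same raw word, when the stem key is already present,
-- adds n+1 to the stem key.
theorem pv_iterA_stem (a : String) : ∀ (n : Nat) (d : PySem.Dict String Int),
    d.contains (pvStem (pvCap a)) = true →
    (List.replicate (n+1) a).foldl pvStepA d
      = d.insert (pvStem (pvCap a)) (d.getD (pvStem (pvCap a)) 0 + (n+1 : Nat)) := by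
  intro n
  induction n with
  | zero =>
    intro d h
    by_cases hw : d.contains (pvCap a) = true <;>
      simp [pvStepA, h, hw]
  | succ m ih =>
    intro d h
    rw [List.replicate_succ, List.foldl_cons]
    have hstep : pvStepA d a = d.insert (pvStem (pvCap a)) (d.getD (pvStem (pvCap a)) 0 + 1) := by
      by_cases hw : d.contains (pvCap a) = true <;> simp [pvStepA, h, hw]
    rw [hstep, ih _ (by simp)]
    rw [PySem.Dict.getD_insert_self, PySem.Dict.insert_insert_self]
    congr 1
    push_cast
    ring

-- A run of n+1 copies, when the word key is present but the stem key is not,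
-- adds n+1 to the word key.
theorem pv_iterA_word (a : String) : ∀ (n : Nat) (d : PySem.Dict String Int),
    d.contains (pvStem (pvCap a)) = false → d.contains (pvCap a) = true →
    (List.replicate (n+1) a).foldl pvStepA d
      = d.insert (pvCap a) (d.getD (pvCap a) 0 + (n+1 : Nat)) := by
  intro n
  induction n with
  | zero =>
    intro d hst hw
    simp [pvStepA, hst, hw]
  | succ m ih =>
    intro d hst hw
    have hne : pvStem (pvCap a) ≠ pvCap a := by
      intro he; rw [he] at hst; rw [hst] at hw; exact Bool.false_ne_true hw
    rw [List.replicate_succ, List.foldl_cons]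
    have hstep : pvStepA d a = d.insert (pvCap a) (d.getD (pvCap a) 0 + 1) := by
      simp [pvStepA, hst, hw]
    rw [hstep, ih _ (by simp [PySem.Dict.contains_insert, hst, hne]) (by simp)]
    rw [PySem.Dict.getD_insert_self, PySem.Dict.insert_insert_self]
    congr 1
    push_cast
    ring

-- A's loop over a maximal run of one raw word equals B's single aggregated step.
theorem pv_runA (a : String) (n : Nat) (d : PySem.Dict String Int) :
    (List.replicate (n+1) a).foldl pvStepA d = pvStepB d (a, ((n+1 : Nat) : Int)) := by
  by_cases hst : d.contains (pvStem (pvCap a)) = true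
  · rw [pv_iterA_stem a n d hst]
    simp [pvStepB, hst]
  · have hst' : d.contains (pvStem (pvCap a)) = false := by
      simpa using hst
    by_cases hw : d.contains (pvCap a) = true
    · rw [pv_iterA_word a n d hst' hw]
      simp [pvStepB, hst', hw]
    · have hw' : d.contains (pvCap a) = false := by simpa using hw
      have hstep : pvStepA d a = d.insert (pvCap a) 1 := by
        simp [pvStepA, hst', hw']
      cases n with
      | zero => simp [List.replicate, hstep, pvStepB, hst', hw']
      | succ m =>
        rw [List.replicate_succ, List.foldl_cons, hstep]
        by_cases hsw : pvStem (pvCap a) = pvCap a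
        · have h1 : (d.insert (pvCap a) 1).contains (pvStem (pvCap a)) = true := by
            simp [hsw]

          rw [pv_iterA_stem a m _ h1, hsw, PySem.Dict.getD_insert_self,
            PySem.Dict.insert_insert_self]
          simp [pvStepB, hst', hw']
          congr 1
          ring
        · have h1 : (d.insert (pvCap a) 1).contains (pvStem (pvCap a)) = false := by
            simp [PySem.Dict.contains_insert, hsw, hst']
          have h2 : (d.insert (pvCap a) 1).contains (pvCap a) = true := by
            simp
          rw [pv_iterA_word a m _ h1 h2, PySem.Dict.getD_insert_self,
            PySem.Dict.insert_insert_self]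
          simp [pvStepB, hst', hw']
          congr 1
          ring

-- folding Set.add over elements already present leaves the set unchanged
theorem pv_foldl_add_of_contains : ∀ (r : List String) (s : PySem.Set String),
    (∀ x ∈ r, s.contains x = true) → r.foldl PySem.Set.add s = s := by
  intro r
  induction r with
  | nil => intro s _; rfl
  | cons x xs ih =>
    intro s h
    rw [List.foldl_cons]
    have hcx : s.contains x = true := h x (by simp)
    have hmx : x ∈ s := by simpa using hcx
    have : PySem.Set.add s x = s := by simp [PySem.Set.add, hmx]
    rw [this]
    exact ih s (fun y hy => h y (by simp [hy]))

-- a leading element not occurring later stays in front through the Set.add fold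
theorem pv_foldl_add_cons_of_not_mem : ∀ (u : List String) (x : String) (s : List String),
    x ∉ u → u.foldl PySem.Set.add (x :: s) = x :: u.foldl PySem.Set.add s := by
  intro u
  induction u with
  | nil => intro x s _; rfl
  | cons y v ih =>
    intro x s hx
    have hyx : y ≠ x := fun he => hx (by simp [he])
    rw [List.foldl_cons, List.foldl_cons]
    have hadd : PySem.Set.add (x :: s) y
        = x :: PySem.Set.add s y := by
      by_cases hc : y ∈ s <;> simp [PySem.Set.add, hyx, hc]
    rw [hadd]
    exact ih x _ (fun h => hx (by simp [h]))

-- first-occurrence dedup of a maximal run: ofList (a :: r ++ u) = a :: ofList u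
theorem pv_ofList_run (a : String) (r u : List String)
    (hr : ∀ x ∈ r, x = a) (hu : a ∉ u) :
    PySem.Set.ofList (a :: (r ++ u)) = a :: PySem.Set.ofList u := by
  show List.foldl PySem.Set.add PySem.Set.empty (a :: (r ++ u)) = _
  rw [List.foldl_cons, List.foldl_append]
  have h0 : PySem.Set.add PySem.Set.empty a = [a] := by
    simp [PySem.Set.add, PySem.Set.empty]
  rw [h0, pv_foldl_add_of_contains r [a]
    (fun x hx => by simp [hr x hx])]
  exact pv_foldl_add_cons_of_not_mem u a [] hu

-- MAIN LEMMA: on a (≤)-sorted list, A's per-occurrence fold equals B's fold of the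
-- aggregated (word, count) pairs in first-appearance order.
theorem pv_foldA_eq_foldB : ∀ (s : List String),
    s.Pairwise (fun x y => x ≤ y) → ∀ (d : PySem.Dict String Int),
    s.foldl pvStepA d
      = ((PySem.Set.ofList s).map (fun w => (w, (List.count w s : Int)))).foldl pvStepB d := by
  intro s
  induction hN : s.length using Nat.strong_induction_on generalizing s with
  | _ N IH =>
  cases s with
  | nil =>
    intro _ d
    simp [PySem.Set.ofList, PySem.Set.empty]
  | cons a t =>
    intro hp d
    have hrel : ∀ x ∈ t, a ≤ x := (List.pairwise_cons.mp hp).1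
    have hpt : t.Pairwise (fun x y => x ≤ y) := (List.pairwise_cons.mp hp).2
    set r := t.takeWhile (fun x => x == a) with hrdef
    set u := t.dropWhile (fun x => x == a) with hudef
    have hsplit : t = r ++ u := (List.takeWhile_append_dropWhile).symm
    have hr : ∀ x ∈ r, x = a := by
      intro x hx
      have := List.mem_takeWhile_imp hx
      simpa using this
    have hus : u.Sublist t := hudef ▸ List.dropWhile_sublist _
    have hpu : u.Pairwise (fun x y => x ≤ y) := hpt.sublist hus
    have hu : a ∉ u := by
      intro ha
      cases hu' : u with
      | nil => rw [hu'] at ha; exact (List.not_mem_nil) ha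
      | cons b v =>
        have hb : ¬ (b == a) = true := by
          have := List.head_dropWhile_not (p := fun x => x == a) (l := t)
            (by rw [← hudef, hu']; simp)
          simpa [← hudef, hu'] using this
        have hba : b ≠ a := by simpa using hb
        have hab : a ≤ b := hrel b (hus.subset (by rw [hu']; simp))
        rw [hu'] at ha
        rcases List.mem_cons.mp ha with h | h
        · exact hba h.symm
        · have hba' : b ≤ a := ((List.pairwise_cons.mp (hu' ▸ hpu)).1) a h
          exact hba (le_antisymm hba' hab)
    have hrep : a :: r = List.replicate (r.length + 1) a := by
      have : a :: r = List.replicate (a :: r).length a :=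
        List.eq_replicate_of_mem (by
          intro b hb
          rcases List.mem_cons.mp hb with h | h
          · exact h
          · exact hr b h)
      simpa using this
    have hNt : t.length + 1 = N := by simpa using hN
    have hlen : u.length < N := by
      have h1 : u.length ≤ t.length := hus.length_le
      omega
    -- counts
    have hcount_a : List.count a (a :: t) = r.length + 1 := by
      rw [hsplit, List.count_cons_self, List.count_append]
      have h1 : List.count a r = r.length := by
        rw [List.count_eq_length]
        intro b hb; exact (hr b hb).symm
      have h2 : List.count a u = 0 := List.count_eq_zero.mpr hu
      omega
    have hcount_u : ∀ w ∈ PySem.Set.ofList u, List.count w (a :: t) = List.count w u := by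
      intro w hw
      have hwu : w ∈ u := (PySem.Set.mem_ofList u w).mp hw
      have hwa : w ≠ a := fun he => hu (he ▸ hwu)
      rw [hsplit]
      have hcr : List.count w r = 0 := List.count_eq_zero.mpr (by
        intro hwr; exact hwa (hr w hwr))
      simp [List.count_append, hcr, Ne.symm hwa]
    -- rewrite the RHS list
    have hof : PySem.Set.ofList (a :: t) = a :: PySem.Set.ofList u := by
      rw [hsplit]; exact pv_ofList_run a r u hr hu
    rw [hof]
    rw [List.map_cons, List.foldl_cons]
    have hmapc : (PySem.Set.ofList u).map (fun w => (w, (List.count w (a :: t) : Int)))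
        = (PySem.Set.ofList u).map (fun w => (w, (List.count w u : Int))) := by
      apply List.map_congr_left
      intro w hw
      rw [hcount_u w hw]
    rw [hmapc]
    rw [hcount_a]
    -- rewrite the LHS fold
    have hlhs : List.foldl pvStepA (pvStepA d a) t
        = u.foldl pvStepA ((List.replicate (r.length + 1) a).foldl pvStepA d) := by
      show List.foldl pvStepA d (a :: t) = _
      rw [hsplit, ← List.cons_append, hrep, List.foldl_append]
    rw [hlhs, pv_runA a r.length d]
    exact IH u.length hlen u rfl hpu _

-- B's frequency loop is Counter(s)
theorem pv_freq_eq_counter (s : List String) :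
    s.foldl (fun d w => d.insert w (d.getD w 0 + 1)) PySem.Dict.empty = PySem.Dict.counter s := rfl

-- ===== VERDICT (by name: the statement is the Claim_ definition above) =====
theorem count_words_in_list_spec : Claim_equal_count_words_in_list := by
  intro word_list _hdom
  show count_words_in_list word_list = count_words_in_list_alt word_list
  unfold count_words_in_list count_words_in_list_alt
  dsimp only
  rw [pv_freq_eq_counter, PySem.Dict.items_counter]
  exact congrArg PySem.Dict.items
    (pv_foldA_eq_foldB _ (PySem.List.sorted_pairwise _ _) _)
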